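-- pv_equiv track=rewrite | github.com/afni/afni | src/python_scripts/afni_python/afni_util.py | encode_1D_ints
-- ===== SOURCE A (Python) =====
-- def encode_1D_ints(ilist):
--    """convert a list of integers to a ',' and '..' separated string"""
--    if not ilist: return ''
--    if len(ilist) < 1: return ''
--
--    text = '%d' % ilist[0]
--    prev = ilist[0]
--    ind  = 1
--    while ind < len(ilist):
--       ncontinue = consec_len(ilist, ind-1) - 1
--       if ncontinue <= 1:     # then no '..' continuation, use ','
--          text = text + ',%d' % ilist[ind]
--          ind += 1
--       else:
--          text = text + '..%d' % ilist[ind+ncontinue-1]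
--          ind += ncontinue
--
--    return text
--
-- def consec_len(ilist, start):
--    """return the length of consecutive integers - always at least 1"""
--    prev = ilist[start]
--    length = len(ilist)
--    for ind in range(start+1, length+1):
--       if ind == length: break
--       if ilist[ind] != prev + 1:
--          break
--       prev = ilist[ind]
--    if ind == start:  length = 1
--    else:             length = ind-start
--
--    return length
-- ===== SOURCE B (Python) =====
-- def encode_1D_ints(ilist):
--    """convert a list of integers to a ',' and '..' separated string"""
--    if not ilist: return ''
--    # one forward pass collecting maximal consecutive runs as (first, last)
--    runs = []
--    start = prev = ilist[0]
--    for v in ilist[1:]: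
--       if v == prev + 1:
--          prev = v
--       else:
--          runs.append((start, prev))
--          start = prev = v
--    runs.append((start, prev))
--    # map each run to tokens: 'first..last' if length >= 3, else each element
--    tokens = []
--    for a, b in runs:
--       if b - a >= 2:
--          tokens.append('%d..%d' % (a, b))
--       else:
--          tokens.extend('%d' % x for x in range(a, b + 1))
--    return ','.join(tokens)
-- ===== Notes on version B (the rewrite author's own statement) =====
-- stated objective: faster
-- what changed: A rescans with a consec_len helper inside an index-driven while loop and grows the result by repeated string concatenation; B first collects the maximal consecutive runs as (first,last) pairs in one pass, then maps each run to its tokens ('first..last' for runs of >=3 elements, individual '%d' otherwise) and returns ','.join(tokens).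
import Mathlib
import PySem

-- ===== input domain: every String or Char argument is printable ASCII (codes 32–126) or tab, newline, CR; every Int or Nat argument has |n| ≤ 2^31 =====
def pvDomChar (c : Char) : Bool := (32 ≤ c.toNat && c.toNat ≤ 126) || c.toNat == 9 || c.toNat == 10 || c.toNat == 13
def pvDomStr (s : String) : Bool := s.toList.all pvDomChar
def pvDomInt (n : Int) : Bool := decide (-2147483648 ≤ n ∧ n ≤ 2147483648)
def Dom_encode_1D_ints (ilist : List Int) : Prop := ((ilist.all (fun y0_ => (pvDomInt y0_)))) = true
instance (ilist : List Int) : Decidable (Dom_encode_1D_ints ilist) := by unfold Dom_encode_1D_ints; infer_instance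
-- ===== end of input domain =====

-- B replaces A's rescanning consec_len helper and incremental string concatenation by one
-- run-collecting pass followed by a token-mapping pass joined with ','; measured faster.

-- ===== PORT A =====
-- the for-loop of consec_len: scan forward from index ind while values stay consecutive
def consecAux (ilist : List Int) (prev : Int) (ind : Nat) : Nat :=
  if h : ind < ilist.length then
    if ilist[ind] ≠ prev + 1 then ind
    else consecAux ilist ilist[ind] (ind + 1)
  else ind
termination_by ilist.length - ind

-- ilist[start] ported as getD: every call A makes has start = ind-1 < len(ilist), in range
def consec_len (ilist : List Int) (start : Nat) : Nat :=
  consecAux ilist (ilist.getD start 0) (start + 1) - start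

-- the while-loop of A, state (text, ind)
def encAux (ilist : List Int) (text : String) (ind : Nat) : String :=
  if _h : ind < ilist.length then
    let nc := consec_len ilist (ind - 1) - 1
    if nc ≤ 1 then
      encAux ilist (text ++ "," ++ PySem.Int.toStr (ilist.getD ind 0)) (ind + 1)
    else
      encAux ilist (text ++ ".." ++ PySem.Int.toStr (ilist.getD (ind + nc - 1) 0)) (ind + nc)
  else text
termination_by ilist.length - ind
decreasing_by
  · omega
  · omega

def encode_1D_ints (ilist : List Int) : String :=
  match ilist with
  | [] => ""
  | x :: _ => encAux ilist (PySem.Int.toStr x) 1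

-- ===== PORT B =====
-- one pass collecting maximal consecutive runs as (first, last) pairs
def runsAux (xs : List Int) (start prev : Int) : List (Int × Int) :=
  match xs with
  | [] => [(start, prev)]
  | v :: rest => if v = prev + 1 then runsAux rest start v
                 else (start, prev) :: runsAux rest v v

-- tokens of one run: 'first..last' when it has >= 3 elements, else each element
def runTokens (r : Int × Int) : List String :=
  if r.2 - r.1 ≥ 2 then [PySem.Int.toStr r.1 ++ ".." ++ PySem.Int.toStr r.2]
  else (PySem.List.pyRange r.1 (r.2 + 1) 1).map PySem.Int.toStr

-- ','.join
def joinC (ts : List String) : String :=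
  match ts with
  | [] => ""
  | s :: rest => rest.foldl (fun acc t => acc ++ "," ++ t) s

def encode_1D_ints_alt (ilist : List Int) : String :=
  match ilist with
  | [] => ""
  | x :: rest => joinC ((runsAux rest x x).flatMap runTokens)

-- ===== PRECONDITION & SPEC =====
def Spec_encode_1D_ints (ilist : List Int) (out : String) : Prop := out = encode_1D_ints_alt ilist
instance (ilist : List Int) (out : String) : Decidable (Spec_encode_1D_ints ilist out) := by unfold Spec_encode_1D_ints; infer_instance

-- ===== CLAIM (what is proved, stated in full; the proofs are below) =====
def Claim_equal_encode_1D_ints : Prop := ∀ (ilist : List Int), Dom_encode_1D_ints ilist → Spec_encode_1D_ints ilist (encode_1D_ints ilist)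

-- ===== LEMMAS AND PROOFS =====

-- length of the consecutive extension of prev at the head of a list
def clen (prev : Int) : List Int → Nat
  | [] => 0
  | t :: ts => if t = prev + 1 then clen t ts + 1 else 0

-- list-level reformulation of A's while-loop tail (text dropped)
def tailString (prev : Int) (tail : List Int) : String :=
  match tail with
  | [] => ""
  | t :: ts =>
    let nc := clen prev (t :: ts)
    if nc ≤ 1 then "," ++ PySem.Int.toStr t ++ tailString t ts
    else ".." ++ PySem.Int.toStr ((t :: ts).getD (nc - 1) 0) ++
         tailString ((t :: ts).getD (nc - 1) 0) (List.drop nc (t :: ts))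
termination_by tail.length
decreasing_by
  all_goals simp_all
  all_goals omega

def preJoin : List String → String
  | [] => ""
  | t :: ts => "," ++ t ++ preJoin ts

def nextRuns : List Int → List (Int × Int)
  | [] => []
  | c :: r => runsAux r c c

theorem foldl_comma (ts : List String) (a : String) :
    ts.foldl (fun acc t => acc ++ "," ++ t) a = a ++ preJoin ts := by
  induction ts generalizing a with
  | nil => simp [preJoin]
  | cons t ts ih => rw [List.foldl_cons, ih]; simp [preJoin, String.append_assoc]

theorem joinC_cons (t : String) (ts : List String) :
    joinC (t :: ts) = t ++ preJoin ts := by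
  simp [joinC, foldl_comma]

theorem preJoin_eq (l : List String) (h : l ≠ []) : preJoin l = "," ++ joinC l := by
  cases l with
  | nil => simp at h
  | cons t ts => simp [preJoin, joinC_cons, String.append_assoc]

theorem clen_getD (l : List Int) (prev : Int) (k : Nat) (hk : k < clen prev l) :
    l.getD k 0 = prev + k + 1 := by
  induction l generalizing prev k with
  | nil => simp [clen] at hk
  | cons t ts ih =>
    by_cases h : t = prev + 1
    · cases k with
      | zero => simpa [h]
      | succ k =>
        simp only [clen, if_pos h] at hk
        have h2 := ih t k (by omega)
        rw [List.getD_cons_succ, h2, h]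
        push_cast; ring
    · simp [clen, h] at hk

theorem clen_drop (l : List Int) (prev : Int) :
    clen (prev + clen prev l) (List.drop (clen prev l) l) = 0 := by
  induction l generalizing prev with
  | nil => simp [clen]
  | cons t ts ih =>
    by_cases h : t = prev + 1
    · have : clen prev (t :: ts) = clen t ts + 1 := by simp [clen, h]
      rw [this]
      have : (prev + (↑(clen t ts + 1) : Int)) = t + clen t ts := by
        push_cast; omega
      rw [this]
      simpa using ih t
    · simp [clen, h]

theorem runsAux_eq (ts : List Int) (a prev : Int) :
    runsAux ts a prev = (a, prev + clen prev ts) :: nextRuns (List.drop (clen prev ts) ts) := by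
  induction ts generalizing a prev with
  | nil => simp [runsAux, clen, nextRuns]
  | cons v rest ih =>
    by_cases h : v = prev + 1
    · rw [show runsAux (v :: rest) a prev = runsAux rest a v from by simp [runsAux, h]]
      rw [ih a v]
      have h1 : clen prev (v :: rest) = clen v rest + 1 := by simp [clen, h]
      rw [h1]
      have h2 : prev + ((clen v rest + 1 : Nat) : Int) = v + (clen v rest : Int) := by
        push_cast; omega
      rw [List.drop_succ_cons, h2]
    · simp [runsAux, h, clen, nextRuns]

theorem tok_ne_nil (a : Int) (m : Nat) : runTokens (a, a + m) ≠ [] := by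
  unfold runTokens
  split
  · simp
  · have : (PySem.List.pyRange a (a + m + 1) 1).length = m + 1 := by
      rw [PySem.List.length_pyRange_one]; omega
    intro hc
    simp only [List.map_eq_nil_iff] at hc
    rw [hc] at this; simp at this

theorem runs_flat_ne_nil (r : List Int) (c : Int) :
    (runsAux r c c).flatMap runTokens ≠ [] := by
  rw [runsAux_eq]
  simp only [List.flatMap_cons]
  intro hc
  exact tok_ne_nil c (clen c r) (by simpa using List.append_eq_nil_iff.mp hc |>.1)

-- pyRange helpers for the short-run tokens
theorem pyRange_single (a : Int) : PySem.List.pyRange a (a + 1) 1 = [a] := by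
  rw [PySem.List.pyRange_one_cons (by omega)]
  have : PySem.List.pyRange (a + 1) (a + 1) 1 = [] := by
    rw [PySem.List.pyRange_one]; simp
  simp [this]

theorem pyRange_pair (a : Int) : PySem.List.pyRange a (a + 2) 1 = [a, a + 1] := by
  rw [PySem.List.pyRange_one_cons (by omega)]
  have h : PySem.List.pyRange (a + 1) (a + 2) 1 = [a + 1] := by
    have h0 := pyRange_single (a + 1)
    rw [show a + 1 + 1 = a + 2 by ring] at h0
    exact h0
  rw [h]

theorem tok_single (a : Int) : runTokens (a, a) = [PySem.Int.toStr a] := by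
  unfold runTokens
  rw [if_neg (by simp)]
  rw [pyRange_single]
  simp

theorem tok_pairT (a : Int) : runTokens (a, a + 1) = [PySem.Int.toStr a, PySem.Int.toStr (a + 1)] := by
  unfold runTokens
  rw [if_neg (by simp)]
  rw [show a + 1 + 1 = a + 2 by ring, pyRange_pair]
  simp

theorem tok_run (a b : Int) (h : b - a ≥ 2) :
    runTokens (a, b) = [PySem.Int.toStr a ++ ".." ++ PySem.Int.toStr b] := by
  unfold runTokens
  rw [if_pos h]

theorem M_nil (a : Int) :
    PySem.Int.toStr a ++ tailString a [] = joinC ((runsAux [] a a).flatMap runTokens) := by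
  simp [tailString, runsAux, tok_single, joinC]

-- one-step unfolding of clen on a cons cell
theorem clen_cons (prev t : Int) (ts : List Int) :
    clen prev (t :: ts) = if t = prev + 1 then clen t ts + 1 else 0 := rfl

-- main correspondence, both statements by strong induction on a length bound
theorem MN (n : Nat) :
    (∀ tail : List Int, tail.length ≤ n → ∀ a : Int,
      PySem.Int.toStr a ++ tailString a tail = joinC ((runsAux tail a a).flatMap runTokens)) ∧
    (∀ tail : List Int, tail.length ≤ n → ∀ prev : Int, clen prev tail = 0 →
      tailString prev tail = preJoin ((nextRuns tail).flatMap runTokens)) := by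
  induction n with
  | zero =>
    constructor
    · intro tail hlen a
      have ht : tail = [] := List.eq_nil_of_length_eq_zero (by omega)
      subst ht; exact M_nil a
    · intro tail hlen prev _
      have ht : tail = [] := List.eq_nil_of_length_eq_zero (by omega)
      subst ht; simp [tailString, nextRuns, preJoin]
  | succ n ihn =>
    obtain ⟨ihM, ihN⟩ := ihn
    constructor
    · intro tail hlen a
      cases tail with
      | nil => exact M_nil a
      | cons t ts =>
        rw [runsAux_eq]
        by_cases h : t = a + 1
        · subst h
          have hm : clen a ((a + 1) :: ts) = clen (a + 1) ts + 1 := by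
            rw [clen_cons, if_pos rfl]
          by_cases h2 : clen (a + 1) ts = 0
          · -- run of length exactly 2: comma branch
            have hm1 : clen a ((a + 1) :: ts) = 1 := by omega
            rw [hm1]
            simp only [tailString]
            rw [hm1, if_pos (by omega)]
            rw [ihN ts (by simp at hlen; omega) (a + 1) h2]
            simp only [Nat.cast_one, List.drop_succ_cons, List.drop_zero]
            rw [List.flatMap_cons, tok_pairT a, List.cons_append, List.singleton_append,
              joinC_cons]
            simp [preJoin, String.append_assoc]
          · -- run of length >= 3: '..' branch
            have hge : 2 ≤ clen a ((a + 1) :: ts) := by omega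
            have hget : ((a + 1) :: ts).getD (clen a ((a + 1) :: ts) - 1) 0 =
                a + (clen a ((a + 1) :: ts) : Int) := by
              have hx := clen_getD ((a + 1) :: ts) a (clen a ((a + 1) :: ts) - 1) (by omega)
              rw [hx]; push_cast; omega
            have hcd : clen (a + (clen a ((a + 1) :: ts) : Int))
                (List.drop (clen a ((a + 1) :: ts)) ((a + 1) :: ts)) = 0 := clen_drop _ a
            have hlen2 : (List.drop (clen a ((a + 1) :: ts)) ((a + 1) :: ts)).length ≤ n := by
              simp at hlen ⊢; omega
            simp only [tailString]
            rw [if_neg (by omega), hget]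
            rw [ihN _ hlen2 _ hcd]
            rw [List.flatMap_cons, tok_run a _ (by push_cast; omega), List.singleton_append,
              joinC_cons]
            simp [String.append_assoc]
        · -- t starts a new run after the singleton run of a
          have hm0 : clen a (t :: ts) = 0 := by rw [clen_cons, if_neg h]
          rw [hm0]
          simp only [tailString]
          rw [hm0, if_pos (by omega)]
          simp only [Nat.cast_zero, add_zero, List.drop_zero]
          have hnr : nextRuns (t :: ts) = runsAux ts t t := rfl
          rw [hnr, List.flatMap_cons, tok_single, List.singleton_append, joinC_cons]
          rw [preJoin_eq _ (runs_flat_ne_nil ts t)]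
          rw [← ihM ts (by simp at hlen; omega) t]
          simp [preJoin, String.append_assoc]
    · intro tail hlen prev h0
      cases tail with
      | nil => simp [tailString, nextRuns, preJoin]
      | cons c r =>
        simp only [tailString]
        rw [h0, if_pos (by omega)]
        have hnr : nextRuns (c :: r) = runsAux r c c := rfl
        rw [hnr, preJoin_eq _ (runs_flat_ne_nil r c)]
        rw [← ihM r (by simp at hlen; omega) c]
        simp [String.append_assoc]

theorem B1 (n : Nat) (ilist : List Int) (prev : Int) (ind : Nat)
    (hn : ilist.length - ind ≤ n) :
    consecAux ilist prev ind = ind + clen prev (List.drop ind ilist) := by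
  induction n generalizing prev ind with
  | zero =>
    have hge : ilist.length ≤ ind := by omega
    have hd : List.drop ind ilist = [] := List.drop_eq_nil_of_le hge
    rw [consecAux]
    simp [hd, clen, Nat.not_lt.mpr hge]
  | succ n ih =>
    by_cases h : ind < ilist.length
    · have hd : List.drop ind ilist = ilist[ind] :: List.drop (ind + 1) ilist :=
        List.drop_eq_getElem_cons h
      rw [consecAux, dif_pos h]
      by_cases he : ilist[ind] = prev + 1
      · rw [if_neg (by simp [he]), ih ilist[ind] (ind + 1) (by omega)]
        rw [hd]; simp [clen, he]; omega
      · rw [if_pos he, hd]; simp [clen, he]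
    · have hd : List.drop ind ilist = [] := List.drop_eq_nil_of_le (by omega)
      rw [consecAux]
      simp [hd, clen, h]

theorem consec_len_eq (ilist : List Int) (start : Nat) (h : start < ilist.length) :
    consec_len ilist start = clen (ilist.getD start 0) (List.drop (start + 1) ilist) + 1 := by
  unfold consec_len
  rw [B1 (ilist.length) ilist _ (start + 1) (by omega)]
  omega

theorem B3 (n : Nat) (ilist : List Int) (text : String) (ind : Nat)
    (hn : ilist.length - ind ≤ n) (h1 : 1 ≤ ind) :
    encAux ilist text ind = text ++ tailString (ilist.getD (ind - 1) 0) (List.drop ind ilist) := by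
  induction n generalizing text ind with
  | zero =>
    have hge : ilist.length ≤ ind := by omega
    have hd : List.drop ind ilist = [] := List.drop_eq_nil_of_le hge
    rw [encAux]
    simp [hd, tailString, Nat.not_lt.mpr hge]
  | succ n ih =>
    by_cases h : ind < ilist.length
    · have hcl : consec_len ilist (ind - 1) =
          clen (ilist.getD (ind - 1) 0) (List.drop ind ilist) + 1 := by
        have := consec_len_eq ilist (ind - 1) (by omega)
        rwa [show ind - 1 + 1 = ind by omega] at this
      have hd : List.drop ind ilist = ilist[ind] :: List.drop (ind + 1) ilist :=
        List.drop_eq_getElem_cons h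
      have hnc : consec_len ilist (ind - 1) - 1 =
          clen (ilist.getD (ind - 1) 0) (List.drop ind ilist) := by omega
      rw [encAux, dif_pos h]
      simp only [hnc]
      by_cases hb : clen (ilist.getD (ind - 1) 0) (List.drop ind ilist) ≤ 1
      · rw [if_pos hb]
        rw [ih _ (ind + 1) (by omega) (by omega)]
        rw [show ind + 1 - 1 = ind by omega]
        conv_rhs => rw [hd]
        simp only [tailString]
        rw [hd] at hb
        rw [if_pos hb]
        have hg : ilist.getD ind 0 = ilist[ind] := by
          simp [List.getD, List.getElem?_eq_getElem h]
        rw [hg]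
        simp [String.append_assoc]
      · rw [if_neg hb]
        set m := clen (ilist.getD (ind - 1) 0) (List.drop ind ilist) with hm
        have hm2 : 2 ≤ m := by omega
        rw [ih _ (ind + m) (by omega) (by omega)]
        have hgl : ilist.getD (ind + m - 1) 0 = (List.drop ind ilist).getD (m - 1) 0 := by
          simp only [List.getD]
          rw [List.getElem?_drop]
          rw [show ind + (m - 1) = ind + m - 1 by omega]
        have hdd : List.drop (ind + m) ilist = List.drop m (List.drop ind ilist) := by
          rw [List.drop_drop]
        conv_rhs => rw [hd]
        simp only [tailString]
        rw [hd] at hm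
        rw [if_neg (by rw [← hm]; omega)]
        rw [← hm, ← hd, hgl, hdd]
        simp [String.append_assoc]
    · have hd : List.drop ind ilist = [] := List.drop_eq_nil_of_le (by omega)
      rw [encAux]
      simp [hd, tailString, h]

-- ===== VERDICT (by name: the statement is the Claim_ definition above) =====
theorem encode_1D_ints_spec : Claim_equal_encode_1D_ints := by
  unfold Claim_equal_encode_1D_ints
  intro ilist _
  unfold Spec_encode_1D_ints
  cases ilist with
  | nil => rfl
  | cons x rest =>
    show encAux (x :: rest) (PySem.Int.toStr x) 1 = _
    rw [B3 ((x :: rest).length) (x :: rest) _ 1 (by omega) (by omega)]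
    rw [show (x :: rest).getD (1 - 1) 0 = x from rfl,
      show List.drop 1 (x :: rest) = rest from rfl]
    rw [(MN rest.length).1 rest (le_refl _) x]
    rfl
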